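-- pv_equiv track=rewrite | github.com/Milpoder/criptography | practica2.py | Cifrado_flujo
-- ===== SOURCE A (Python) =====
-- from operator import xor #operador xor
--
-- def LFSR(li,s,k):
--     lis = s
--     assert(len(li)==len(s))
--     for i in range(0,k):
--         sj = 0 #reinicio del feedback
--         for j in range(1,len(li)+1): #para cada coeficiente del polinomio
--             a = lis[j+i-1]*li[-j] #se hace un and
--             sj = xor(sj,a) #se hace un xor
--         lis += [sj]  #añadimos la semilla al final de la cadena
--     return lis
--
-- def Geffe(li,li1,li2,s,s1,s2,k):
--     #cálculo de los tres LFSR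
--     a = LFSR(li,s,k)
--     b = LFSR(li1,s1,k)
--     c = LFSR(li2,s2,k)
--     salida = []
--     #cálculo de el generador de Geffe
--     for i,j,k in zip(a,b,c):
--         x1 = i*j#primero multiplica a segundo
--         x2 = j*k#primero multiplica a tercero
--         x3 = k #tercero
--         f = xor(xor(x1,x2),x3) #cálculo de la xor
--         salida.append(f) #añadimos a la lista de salida
--     return salida
--
-- def ascii_a_bin(char):
-- 	ascii = ord(char)
-- 	bin = []
-- 	while (ascii > 0):
-- 		if (ascii & 1) == 1:
-- 			bin.append("1")
-- 		else:
-- 			bin.append("0")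
-- 		ascii = ascii >> 1
-- 	bin.reverse()
-- 	binary = "".join(bin)
-- 	zerofix = (8 - len(binary)) * '0'
-- 	return zerofix + binary
--
-- def Cifrado_flujo(m):
--     binario = []
--     list_bin = []
--     for i in m:#convertimos texto a binario(list de string)
--         binario.append(ascii_a_bin(i))
--     #pasamos de list de string a list de int
--     for i in binario:
--         for j in i:
--             if j == '0':
--                 list_bin.append(0)
--             else:
--                 list_bin.append(1)
--     k = Geffe([1],[1,1],[0,1,1],[0],[0,1],[1,0,1],len(list_bin))#polinomios primivitos que mcd es 1 ya que sería las rachas de la forma (2^n)-1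
--     salida = []
--     for i,j in zip(list_bin,k):
--         salida.append(xor(i,j))
--     return salida
-- ===== SOURCE B (Python) =====
-- def Cifrado_flujo(m):
--     # message bits, 8 MSB-first bits per character
--     bits = [int(d) for c in m for d in format(ord(c), '08b')]
--     # three Geffe LFSR registers as scalar states; register A's feedback (tap [1])
--     # is the identity, so a0 never changes
--     a0 = 0
--     b0, b1 = 0, 1
--     c0, c1, c2 = 1, 0, 1
--     salida = []
--     for mb in bits:
--         f = (a0 * b0) ^ (b0 * c0) ^ c0
--         salida.append(mb ^ f)
--         b0, b1 = b1, b0 ^ b1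
--         c0, c1, c2 = c1, c2, c0 ^ c1
--     return salida
-- ===== Notes on version B (the rewrite author's own statement) =====
-- stated objective: faster
-- what changed: B converts each character with an 8-bit format instead of a manual bit-reverse-join loop and computes the cipher in one fused streaming loop that keeps only the three small LFSR register states, instead of materialising three full keystream lists by repeated index arithmetic into growing lists and then zipping them twice.
import Mathlib
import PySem

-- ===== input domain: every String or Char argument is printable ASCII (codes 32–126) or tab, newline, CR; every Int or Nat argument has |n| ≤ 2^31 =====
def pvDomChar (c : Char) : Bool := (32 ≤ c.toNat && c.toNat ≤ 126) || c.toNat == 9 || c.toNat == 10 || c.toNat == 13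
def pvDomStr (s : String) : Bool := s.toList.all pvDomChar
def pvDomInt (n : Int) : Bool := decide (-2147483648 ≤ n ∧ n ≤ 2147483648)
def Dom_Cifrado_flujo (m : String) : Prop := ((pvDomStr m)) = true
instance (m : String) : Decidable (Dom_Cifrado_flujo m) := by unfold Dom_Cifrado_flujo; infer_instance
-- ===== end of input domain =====

-- B replaces A's three full LFSR key-stream lists (built by index arithmetic into a
-- growing list, then zipped) by one fused streaming loop over the message bits that
-- keeps only the three small register states; same return value on the whole domain.

-- ===== PORT A =====
-- operator.xor on ints = bitwise xor = PySem.Int.bxor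
-- LFSR: the growing list 'lis' is indexed with lis[j+i-1] (always in range on the
-- calls Cifrado_flujo makes, since len(lis) = len(s)+i and 1 ≤ j ≤ len(li) = len(s));
-- pyGetD with default 0 is therefore exact here.
def pyLFSR (li s : List Int) (k : Int) : List Int :=
  (PySem.List.pyRange 0 k).foldl (fun lis i =>
    lis ++ [(PySem.List.pyRange 1 ((li.length : Int) + 1)).foldl
      (fun sj j => PySem.Int.bxor sj
        (PySem.List.pyGetD lis (j + i - 1) 0 * PySem.List.pyGetD li (-j) 0)) 0]) s

-- 'for i,j,k in zip(a,b,c): salida.append(xor(xor(i*j, j*k), k))'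
def geffeZip : List Int → List Int → List Int → List Int
  | i :: as, j :: bs, k :: cs =>
      PySem.Int.bxor (PySem.Int.bxor (i * j) (j * k)) k :: geffeZip as bs cs
  | _, _, _ => []

def pyGeffe (li li1 li2 s s1 s2 : List Int) (k : Int) : List Int :=
  let a := pyLFSR li s k
  let b := pyLFSR li1 s1 k
  let c := pyLFSR li2 s2 k
  geffeZip a b c

-- ascii_a_bin's 'while ascii > 0' loop: bits of 'ascii' LSB first, each a
-- one-character string ("1"/"0") modelled as the Char it holds; ascii & 1 == 1 is
-- n % 2 = 1 and ascii >> 1 is n / 2 on Nat.  The loop halves its argument, so it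
-- runs at most a times: fuel 'a' makes the recursion structural without changing
-- the value for ANY a.
def asciiBitsLoopAux : Nat → Nat → List Char
  | 0, _ => []
  | fuel + 1, a => if a = 0 then [] else (if a % 2 = 1 then '1' else '0') :: asciiBitsLoopAux fuel (a / 2)

def asciiBitsLoop (a : Nat) : List Char := asciiBitsLoopAux a a

-- ascii_a_bin: zerofix + "".join(reversed(bin)); the Python string as its char list
def asciiABinCore (n : Nat) : List Char :=
  let binary := (asciiBitsLoop n).reverse
  List.replicate (8 - binary.length) '0' ++ binary

def asciiABin (c : Char) : List Char := asciiABinCore c.toNat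

def Cifrado_flujo (m : String) : List Int :=
  let binario := m.toList.foldl (fun acc i => acc ++ [asciiABin i]) []
  let list_bin := binario.foldl
    (fun acc i => i.foldl (fun acc2 j => acc2 ++ [if j = '0' then (0 : Int) else 1]) acc) []
  let k := pyGeffe [1] [1, 1] [0, 1, 1] [0] [0, 1] [1, 0, 1] (list_bin.length : Int)
  (list_bin.zip k).foldl (fun acc p => acc ++ [PySem.Int.bxor p.1 p.2]) []

-- ===== PORT B =====
-- format(ord(c), '08b') digit list as ints; exact for n < 256, which covers every
-- character the domain admits (codes 9, 10, 13, 32–126)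
def fmt08 (n : Nat) : List Int :=
  (List.range 8).map (fun i => ((n >>> (7 - i)) % 2 : Nat))

-- the fused loop: per message bit emit mb ^ ((a0*b0) ^ (b0*c0) ^ c0), then advance
-- the B and C registers by their feedback (A's feedback is the identity)
def geffeStream (a0 b0 b1 c0 c1 c2 : Int) : List Int → List Int
  | [] => []
  | mb :: rest =>
      PySem.Int.bxor mb (PySem.Int.bxor (PySem.Int.bxor (a0 * b0) (b0 * c0)) c0) ::
        geffeStream a0 b1 (PySem.Int.bxor b0 b1) c1 c2 (PySem.Int.bxor c0 c1) rest

def Cifrado_flujo_alt (m : String) : List Int :=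
  geffeStream 0 0 1 1 0 1 (m.toList.flatMap (fun c => fmt08 c.toNat))

-- ===== PRECONDITION & SPEC =====
def Spec_Cifrado_flujo (m : String) (out : List Int) : Prop := out = Cifrado_flujo_alt m
instance (m : String) (out : List Int) : Decidable (Spec_Cifrado_flujo m out) := by unfold Spec_Cifrado_flujo; infer_instance

-- ===== CLAIM (what is proved, stated in full; the proofs are below) =====
def Claim_equal_Cifrado_flujo : Prop := ∀ (m : String), Dom_Cifrado_flujo m → Spec_Cifrado_flujo m (Cifrado_flujo m)

-- ===== LEMMAS AND PROOFS =====

-- the i-th bit of the B register stream (seeds b0 b1, feedback b0 ^ b1)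
def nthB (b0 b1 : Int) : Nat → Int
  | 0 => b0
  | n + 1 => nthB b1 (PySem.Int.bxor b0 b1) n

-- the i-th bit of the C register stream (seeds c0 c1 c2, feedback c0 ^ c1)
def nthC (c0 c1 c2 : Int) : Nat → Int
  | 0 => c0
  | n + 1 => nthC c1 c2 (PySem.Int.bxor c0 c1) n

theorem nthB_rec : ∀ (n : Nat) (b0 b1 : Int), nthB b0 b1 (n + 2) = PySem.Int.bxor (nthB b0 b1 n) (nthB b0 b1 (n + 1)) := by
  intro n
  induction n with
  | zero => intro b0 b1; rfl
  | succ n ih => intro b0 b1; exact ih b1 (PySem.Int.bxor b0 b1)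

theorem nthC_rec : ∀ (n : Nat) (c0 c1 c2 : Int), nthC c0 c1 c2 (n + 3) = PySem.Int.bxor (nthC c0 c1 c2 n) (nthC c0 c1 c2 (n + 1)) := by
  intro n
  induction n with
  | zero => intro c0 c1 c2; rfl
  | succ n ih => intro c0 c1 c2; exact ih c1 c2 (PySem.Int.bxor c0 c1)

theorem lfsrA (k : Nat) : pyLFSR [1] [0] (k : Int) = (List.range (k + 1)).map (fun _ => (0 : Int)) := by
  induction k with
  | zero => rfl
  | succ k ih =>
      unfold pyLFSR
      rw [show ((k+1:Nat) : Int) = (k : Int) + 1 from by push_cast; ring,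
          PySem.List.pyRange_one_succ_right (a:=0) (b:=(k:Int)) (Int.natCast_nonneg k), List.foldl_append]
      unfold pyLFSR at ih
      rw [ih]
      simp only [List.foldl_cons, List.foldl_nil]
      rw [show PySem.List.pyRange 1 (([1]:List Int).length + 1) = [1] from rfl]
      simp only [List.foldl_cons, List.foldl_nil]
      norm_num
      simp [List.replicate_succ']

theorem lfsrB (k : Nat) : pyLFSR [1, 1] [0, 1] (k : Int) = (List.range (k + 2)).map (nthB 0 1) := by
  induction k with
  | zero => rfl
  | succ k ih =>
      unfold pyLFSR
      rw [show ((k+1:Nat) : Int) = (k : Int) + 1 from by push_cast; ring,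
          PySem.List.pyRange_one_succ_right (a:=0) (b:=(k:Int)) (Int.natCast_nonneg k), List.foldl_append]
      unfold pyLFSR at ih
      rw [ih]
      simp only [List.foldl_cons, List.foldl_nil]
      rw [show PySem.List.pyRange 1 (([1,1]:List Int).length + 1) = [1,2] from rfl]
      simp only [List.foldl_cons, List.foldl_nil]
      norm_num
      rw [show ((2:Int) + (k:Int) - 1) = (((k+1:Nat)) : Int) from by push_cast; ring,
          PySem.List.pyGetD_natCast, PySem.List.getD_map_range _ _ _ _ (by omega)]
      rw [show PySem.List.pyGetD [1,1] (-1) (0:Int) = 1 from rfl,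
          show PySem.List.pyGetD [1,1] (-2) (0:Int) = 1 from rfl]
      simp [List.range_succ, nthB_rec, PySem.Int.bxor_comm 0, PySem.Int.bxor_zero]

theorem lfsrC (k : Nat) : pyLFSR [0, 1, 1] [1, 0, 1] (k : Int) = (List.range (k + 3)).map (nthC 1 0 1) := by
  induction k with
  | zero => rfl
  | succ k ih =>
      unfold pyLFSR
      rw [show ((k+1:Nat) : Int) = (k : Int) + 1 from by push_cast; ring,
          PySem.List.pyRange_one_succ_right (a:=0) (b:=(k:Int)) (Int.natCast_nonneg k), List.foldl_append]
      unfold pyLFSR at ih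
      rw [ih]
      simp only [List.foldl_cons, List.foldl_nil]
      rw [show PySem.List.pyRange 1 (([0,1,1]:List Int).length + 1) = [1,2,3] from rfl]
      simp only [List.foldl_cons, List.foldl_nil]
      norm_num
      rw [show ((2:Int) + (k:Int) - 1) = (((k+1:Nat)) : Int) from by push_cast; ring,
          show ((3:Int) + (k:Int) - 1) = (((k+2:Nat)) : Int) from by push_cast; ring,
          PySem.List.pyGetD_natCast, PySem.List.pyGetD_natCast,
          PySem.List.getD_map_range _ _ _ _ (by omega),
          PySem.List.getD_map_range _ _ _ _ (by omega)]
      rw [show PySem.List.pyGetD [0,1,1] (-1) (0:Int) = 1 from rfl,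
          show PySem.List.pyGetD [0,1,1] (-2) (0:Int) = 1 from rfl,
          show PySem.List.pyGetD [0,1,1] (-3) (0:Int) = 0 from rfl]
      simp [List.range_succ, nthC_rec, PySem.Int.bxor_comm 0, PySem.Int.bxor_zero]

theorem map_range_nthB (b0 b1 : Int) (k : Nat) :
    (List.range (k + 1)).map (nthB b0 b1) = b0 :: (List.range k).map (nthB b1 (PySem.Int.bxor b0 b1)) := by
  rw [List.range_succ_eq_map, List.map_cons, List.map_map]
  rfl

theorem map_range_nthC (c0 c1 c2 : Int) (k : Nat) :
    (List.range (k + 1)).map (nthC c0 c1 c2) = c0 :: (List.range k).map (nthC c1 c2 (PySem.Int.bxor c0 c1)) := by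
  rw [List.range_succ_eq_map, List.map_cons, List.map_map]
  rfl

theorem map_range_const (a0 : Int) (k : Nat) :
    (List.range (k + 1)).map (fun _ => a0) = a0 :: (List.range k).map (fun _ => a0) := by
  rw [List.range_succ_eq_map, List.map_cons, List.map_map]
  rfl

theorem stream_zip : ∀ (ms : List Int) (b0 b1 c0 c1 c2 a0 : Int),
    ((ms.zip (geffeZip ((List.range (ms.length + 1)).map (fun _ => a0))
        ((List.range (ms.length + 2)).map (nthB b0 b1))
        ((List.range (ms.length + 3)).map (nthC c0 c1 c2)))).map
      (fun p => PySem.Int.bxor p.1 p.2))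
    = geffeStream a0 b0 b1 c0 c1 c2 ms := by
  intro ms
  induction ms with
  | nil => intro b0 b1 c0 c1 c2 a0; rfl
  | cons mb rest ih =>
      intro b0 b1 c0 c1 c2 a0
      simp only [List.length_cons]
      rw [show rest.length + 1 + 1 = (rest.length + 1) + 1 from rfl,
          show rest.length + 1 + 2 = (rest.length + 2) + 1 from rfl,
          show rest.length + 1 + 3 = (rest.length + 3) + 1 from rfl,
          map_range_const, map_range_nthB, map_range_nthC]
      show _ :: _ = _ :: _
      congr 1
      exact ih b1 (PySem.Int.bxor b0 b1) c1 c2 (PySem.Int.bxor c0 c1) a0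

theorem charBits : ∀ n : Nat, n < 127 →
    ((32 ≤ n ∧ n ≤ 126) ∨ n = 9 ∨ n = 10 ∨ n = 13) →
    (asciiABinCore n).map (fun j => if j = '0' then (0 : Int) else 1) = fmt08 n := by
  decide

theorem bits_eq (l : List Char) (h : l.all pvDomChar = true) :
    l.flatMap (fun c => (asciiABin c).map (fun j => if j = '0' then (0 : Int) else 1))
      = l.flatMap (fun c => fmt08 c.toNat) := by
  induction l with
  | nil => rfl
  | cons c t ih =>
      simp only [List.all_cons, Bool.and_eq_true] at h
      have hc : pvDomChar c = true := h.1
      simp only [pvDomChar, Bool.or_eq_true, Bool.and_eq_true, beq_iff_eq,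
        decide_eq_true_eq] at hc
      simp only [List.flatMap_cons, ih h.2]
      congr 1
      exact charBits c.toNat (by omega) (by omega)

-- ===== VERDICT (by name: the statement is the Claim_ definition above) =====
theorem Cifrado_flujo_spec : Claim_equal_Cifrado_flujo := by
  intro m hd
  unfold Spec_Cifrado_flujo Cifrado_flujo Cifrado_flujo_alt pyGeffe
  simp only [PySem.List.foldl_append_singleton_eq_map, List.nil_append,
    PySem.List.foldl_append_eq_flatMap, List.flatMap_map]
  rw [bits_eq m.toList hd]
  set ms := m.toList.flatMap (fun c => fmt08 c.toNat) with hms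
  rw [lfsrA ms.length, lfsrB ms.length, lfsrC ms.length, stream_zip]
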